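-- pv_equiv track=rewrite | github.com/alegomeza/Exponential-Encryption | test_open_text.py | int_to_lis_int
-- ===== SOURCE A (Python) =====
-- def int_to_lis_int(num:int, max_len:int) -> list:
--     dig = str(num)
--     rang = ((len(dig) - 1) // max_len) + 1
--     res = len(dig) % max_len
--     if res == 0:
--         dig_lis = [dig[max_len*idx:max_len*(idx + 1)] for idx in range(rang)]
--     else:
--         dig_lis = [dig[:res]] + [dig[res + max_len*idx:res + max_len*(idx + 1)] \
--                                for idx in range(rang - 1)]
--     return [int(dig) for dig in dig_lis]
-- ===== SOURCE B (Python) =====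
-- def int_to_lis_int(num: int, max_len: int) -> list:
--     dig = str(num)
--     chunks = []
--     start = len(dig)
--     while start > 0:
--         chunks.append(int(dig[max(0, start - max_len):start]))
--         start -= max_len
--     return chunks[::-1]
-- ===== Notes on version B (the rewrite author's own statement) =====
-- stated objective: simpler
-- what changed: Replaced A's closed-form rang/res computation and two-branch left-anchored slice comprehension with a single right-to-left while loop that peels chunks off the end of the digit string and reverses the result.
-- outside the precondition, e.g. on int_to_lis_int(123, -1): A returns [], B raises ValueError; on int_to_lis_int(123, -2): A returns [12], B raises ValueError
import Mathlib
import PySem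

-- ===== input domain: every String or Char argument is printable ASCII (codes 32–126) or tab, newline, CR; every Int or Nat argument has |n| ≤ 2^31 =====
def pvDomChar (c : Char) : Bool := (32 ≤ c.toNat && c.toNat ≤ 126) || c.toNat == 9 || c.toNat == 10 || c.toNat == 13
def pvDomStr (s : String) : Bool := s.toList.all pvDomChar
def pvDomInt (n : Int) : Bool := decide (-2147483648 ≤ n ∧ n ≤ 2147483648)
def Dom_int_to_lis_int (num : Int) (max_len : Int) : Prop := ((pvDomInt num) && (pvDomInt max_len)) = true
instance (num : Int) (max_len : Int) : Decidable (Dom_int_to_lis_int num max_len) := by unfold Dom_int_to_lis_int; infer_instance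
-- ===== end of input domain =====

-- B replaces A's rang/res closed-form two-branch comprehension with one right-to-left chunking loop; objective: simpler.


-- ===== PORT A =====
def int_to_lis_int (num : Int) (max_len : Int) : List Int :=
  let dig := PySem.Int.toChars num
  let rang := PySem.Int.floordiv ((dig.length : Int) - 1) max_len + 1
  let res := PySem.Int.mod (dig.length : Int) max_len
  let dig_lis : List (List Char) :=
    if res = 0 then
      (PySem.List.pyRange 0 rang 1).map
        (fun idx => PySem.List.slice dig (some (max_len * idx)) (some (max_len * (idx + 1))))
    else
      PySem.List.slice dig none (some res) ::
        (PySem.List.pyRange 0 (rang - 1) 1).map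
          (fun idx => PySem.List.slice dig (some (res + max_len * idx)) (some (res + max_len * (idx + 1))))
  dig_lis.map (fun d => (PySem.Int.ofChars? d).getD 0)

-- ===== PORT B =====
-- the while loop of Source B; the `1 ≤ max_len` guard only makes the loop total (Python B raises/diverges for max_len ≤ 0, outside Pre_)
def pvAltLoop (dig : List Char) (max_len : Int) (start : Int) : List Int :=
  if _h : 0 < start ∧ 1 ≤ max_len then
    (PySem.Int.ofChars? (PySem.List.slice dig (some (max 0 (start - max_len))) (some start))).getD 0
      :: pvAltLoop dig max_len (start - max_len)
  else []
termination_by start.toNat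
decreasing_by omega

def int_to_lis_int_alt (num : Int) (max_len : Int) : List Int :=
  let dig := PySem.Int.toChars num
  (pvAltLoop dig max_len (dig.length : Int)).reverse

-- ===== PRECONDITION & SPEC =====
-- Pre_ excludes exactly where A raises: max_len ≤ 0 (ZeroDivisionError for 0; for max_len < 0 A's values like [] or
-- a truncated prefix are floor-division/negative-slice artefacts and B raises ValueError), and negative num whose
-- leading chunk is the bare sign '-' (ValueError in both A and B).
def Pre_int_to_lis_int (num : Int) (max_len : Int) : Prop :=
  1 ≤ max_len ∧
    (0 ≤ num ∨
      (PySem.Int.mod ((PySem.Int.toChars num).length : Int) max_len ≠ 1 ∧ max_len ≠ 1))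
instance (num : Int) (max_len : Int) : Decidable (Pre_int_to_lis_int num max_len) := by
  unfold Pre_int_to_lis_int; infer_instance

def pvWitness_int_to_lis_int : Int × Int := (12345, 2)

def Spec_int_to_lis_int (num : Int) (max_len : Int) (out : List Int) : Prop := out = int_to_lis_int_alt num max_len
instance (num : Int) (max_len : Int) (out : List Int) : Decidable (Spec_int_to_lis_int num max_len out) := by unfold Spec_int_to_lis_int; infer_instance

-- ===== CLAIM (what is proved, stated in full; the proofs are below) =====
def Claim_equal_int_to_lis_int : Prop := ∀ (num : Int) (max_len : Int), Dom_int_to_lis_int num max_len → Pre_int_to_lis_int num max_len → Spec_int_to_lis_int num max_len (int_to_lis_int num max_len)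

-- ===== LEMMAS AND PROOFS =====

-- abbreviation for "int of the slice [a,b) of dig", used by the proofs only
def pvChunk (dig : List Char) (a b : Int) : Int :=
  (PySem.Int.ofChars? (PySem.List.slice dig (some a) (some b))).getD 0

-- B's loop, reversed, from start = r + q*m with 0 < r ≤ m: first the remainder chunk [0,r), then q full chunks.
theorem pvAltLoop_rev (dig : List Char) (m : Int) (hm : 1 ≤ m) :
    ∀ (q : ℕ) (r : Int), 0 < r → r ≤ m →
      (pvAltLoop dig m (r + q * m)).reverse =
        pvChunk dig 0 r ::
          (List.range q).map (fun i : ℕ => pvChunk dig (r + (i : Int) * m) (r + (i : Int) * m + m)) := by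
  intro q
  induction q with
  | zero =>
    intro r hr hrm
    rw [pvAltLoop]
    have h1 : 0 < r + ((0:ℕ) : Int) * m ∧ 1 ≤ m := by push_cast; constructor <;> omega
    rw [dif_pos h1, pvAltLoop, dif_neg (by push_cast; omega)]
    have hmax : max 0 (r + ((0:ℕ) : Int) * m - m) = 0 := by push_cast; omega
    rw [hmax]
    simp [pvChunk]
  | succ q ih =>
    intro r hr hrm
    have hqm : (0:ℤ) ≤ (q : Int) * m := mul_nonneg (Int.natCast_nonneg q) (by omega)
    rw [pvAltLoop]
    have h1 : 0 < r + ((q+1:ℕ) : Int) * m ∧ 1 ≤ m := by push_cast; constructor <;> nlinarith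
    rw [dif_pos h1]
    have hs : r + ((q+1:ℕ) : Int) * m - m = r + (q : Int) * m := by push_cast; ring
    rw [hs, List.reverse_cons, ih r hr hrm, List.range_succ]
    have hmax : max 0 (r + (q : Int) * m) = r + (q : Int) * m := by omega
    have hend : r + ((q+1:ℕ) : Int) * m = r + (q : Int) * m + m := by push_cast; ring
    simp only [List.map_append, List.map_cons, List.map_nil, List.cons_append, hmax, hend, pvChunk]

theorem int_to_lis_int_spec : Claim_equal_int_to_lis_int := by
  intro num m _ hpre
  obtain ⟨hm, -⟩ := hpre
  unfold Spec_int_to_lis_int int_to_lis_int int_to_lis_int_alt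
  simp only []
  set dig := PySem.Int.toChars num with hdig
  set n : Int := ((dig.length : Nat) : Int) with hn
  rw [PySem.Int.mod_eq_emod_of_pos (by omega), PySem.Int.floordiv_eq_ediv_of_pos (by omega)]
  have hdm := Int.ediv_add_emod n m
  by_cases h0 : dig.length = 0
  · -- empty digit string (unreachable for str(num), handled for totality)
    have hn0 : n = 0 := by simp [hn, h0]
    have hneg : ((-1 : Int)) / m = -1 := by
      have e1 : (-1 : Int) = (m - 1) + (-1) * m := by linarith
      conv_lhs => rw [e1]
      rw [Int.add_mul_ediv_right _ _ (by omega : m ≠ 0),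
        Int.ediv_eq_zero_of_lt (by omega) (by omega)]
      norm_num
    rw [pvAltLoop, dif_neg (by omega)]
    simp [hn0, hneg]
  · have h1n : 1 ≤ n := by simp [hn]; omega
    by_cases hres : n % m = 0
    · -- res == 0 branch: r = m, q = n/m - 1
      have hk1 : 1 ≤ n / m := by nlinarith [hdm]
      set q : ℕ := (n / m - 1).toNat with hq
      have hqc : (q : Int) = n / m - 1 := by omega
      have hnq : n = m + (q : Int) * m := by rw [hqc]; nlinarith [hdm]
      have hrang : (n - 1) / m = (q : Int) := by
        rw [show n - 1 = (m - 1) + (q : Int) * m by omega,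
          Int.add_mul_ediv_right _ _ (by omega : m ≠ 0),
          Int.ediv_eq_zero_of_lt (by omega) (by omega), zero_add]
      rw [if_pos hres, hrang, hnq, pvAltLoop_rev dig m hm q m (by omega) (by omega),
        PySem.List.pyRange_one, show ((q : Int) + 1 - 0).toNat = q + 1 by omega,
        List.range_succ_eq_map]
      simp only [List.map_cons, List.map_map, pvChunk]
      refine List.cons_eq_cons.mpr ⟨?_, ?_⟩
      · norm_num
      · apply List.map_congr_left
        intro i _
        simp only [Function.comp_apply]
        congr 2 <;> (push_cast; ring)
    · -- res != 0 branch: r = n % m, q = n/m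
      set r : Int := n % m with hr
      have hrpos : 0 < r := by
        have := Int.emod_nonneg n (by omega : m ≠ 0); omega
      have hrm : r < m := Int.emod_lt_of_pos n (by omega)
      have hq0 : 0 ≤ n / m := by nlinarith [hdm]
      set q : ℕ := (n / m).toNat with hq
      have hqc : (q : Int) = n / m := by omega
      have hnq : n = r + (q : Int) * m := by rw [hqc]; nlinarith [hdm]
      have hrang : (n - 1) / m = (q : Int) := by
        rw [show n - 1 = (r - 1) + (q : Int) * m by omega,
          Int.add_mul_ediv_right _ _ (by omega : m ≠ 0),
          Int.ediv_eq_zero_of_lt (by omega) (by omega), zero_add]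
      rw [if_neg hres, hrang, hnq, pvAltLoop_rev dig m hm q r (by omega) (by omega),
        show (q : Int) + 1 - 1 = (q : Int) by ring, PySem.List.pyRange_one,
        show ((q : Int) - 0).toNat = q by omega]
      simp only [List.map_cons, List.map_map, pvChunk]
      refine List.cons_eq_cons.mpr ⟨?_, ?_⟩
      · simp
      · apply List.map_congr_left
        intro i _
        simp only [Function.comp_apply]
        congr 2 <;> (push_cast; ring)
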